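-- pv_equiv track=rewrite | github.com/Livius2024/hirag-prod | src/hirag_prod/cross_language_search/functions.py | get_token_index
-- ===== SOURCE A (Python) =====
-- from typing import Any, Dict, List, Literal, Set, Tuple
--
-- def get_token_index(
--     token_start_index_list: List[int], token_end_index_list: List[int], char_index: int
-- ) -> Tuple[int, bool]:
--     left_index: int = 0
--     right_index: int = len(token_start_index_list)
--     while left_index < right_index:
--         mid_index: int = (left_index + right_index) // 2
--         if (char_index >= token_start_index_list[mid_index]) and (
--             char_index < token_end_index_list[mid_index]
--         ):
--             return mid_index, True
--         elif token_start_index_list[mid_index] > char_index: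
--             right_index = mid_index
--         else:
--             left_index = mid_index + 1
--     return left_index, False
-- ===== SOURCE B (Python) =====
-- from typing import List, Tuple
--
--
-- def get_token_index(
--     token_start_index_list: List[int], token_end_index_list: List[int], char_index: int
-- ) -> Tuple[int, bool]:
--     def go(base, seg):
--         if not seg:
--             return base, False
--         m = len(seg) // 2
--         s, e = seg[m]
--         if char_index < s:
--             return go(base, seg[:m])
--         if char_index < e:
--             return base + m, True
--         return go(base + m + 1, seg[m + 1:])
--
--     return go(0, list(zip(token_start_index_list, token_end_index_list)))
-- ===== Notes on version B (the rewrite author's own statement) =====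
-- stated objective: alternative
-- what changed: Instead of A's while-loop mutating integer bounds over two parallel lists, B zips starts and ends into one list of pairs once and does a divide-and-conquer recursion that physically splits the segment with slicing (seg[:m] / seg[m+1:]) while carrying a base offset.
-- outside the precondition, e.g. on get_token_index([-1, -1, -1, -1], [-1, 1, 1], 0): A returns (2, True), B returns (1, True)
import Mathlib
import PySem

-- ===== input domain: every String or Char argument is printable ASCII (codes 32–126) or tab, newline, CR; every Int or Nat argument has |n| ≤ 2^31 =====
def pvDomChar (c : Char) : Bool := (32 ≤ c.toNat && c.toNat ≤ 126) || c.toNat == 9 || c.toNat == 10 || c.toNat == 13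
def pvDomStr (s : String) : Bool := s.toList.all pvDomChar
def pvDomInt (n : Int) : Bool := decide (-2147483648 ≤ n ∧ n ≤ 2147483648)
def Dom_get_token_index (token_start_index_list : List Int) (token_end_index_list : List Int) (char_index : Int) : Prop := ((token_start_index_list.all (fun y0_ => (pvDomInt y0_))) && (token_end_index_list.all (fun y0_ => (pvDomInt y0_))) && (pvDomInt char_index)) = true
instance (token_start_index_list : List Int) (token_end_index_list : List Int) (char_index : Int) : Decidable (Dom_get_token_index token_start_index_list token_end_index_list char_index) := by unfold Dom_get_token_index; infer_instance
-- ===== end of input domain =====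

-- B zips the two lists into one pair list and binary-searches by divide-and-conquer on
-- list segments (slicing), carrying a base offset, instead of A's while-loop over
-- mutable integer bounds (objective: alternative).

-- ===== PORT A =====
-- midpoint bounds, cited by the A port's decreasing_by
theorem pv_mid_bounds (l r : Int) (h : l < r) :
    l ≤ PySem.Int.floordiv (l + r) 2 ∧ PySem.Int.floordiv (l + r) 2 < r := by
  have hb := PySem.Int.floordiv_two_mid_bounds (le_of_lt h)
  have hlt : PySem.Int.floordiv (l + r) 2 < r := by
    rw [PySem.Int.floordiv_lt_iff_lt_mul (by omega : (0:Int) < 2)]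
    omega
  exact ⟨hb.1, hlt⟩

-- while-loop of A as recursion over the mutated state (left_index, right_index)
def pvLoopA (starts ends : List Int) (ci left right : Int) : Int × Bool :=
  if h : left < right then
    let mid : Int := PySem.Int.floordiv (left + right) 2
    if ci ≥ PySem.List.pyGetD starts mid 0 ∧ ci < PySem.List.pyGetD ends mid 0 then
      (mid, true)
    else if PySem.List.pyGetD starts mid 0 > ci then
      pvLoopA starts ends ci left mid
    else
      pvLoopA starts ends ci (mid + 1) right
  else (left, false)
termination_by (right - left).toNat
decreasing_by
  · have := pv_mid_bounds left right h; omega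
  · have := pv_mid_bounds left right h; omega

def get_token_index (token_start_index_list : List Int) (token_end_index_list : List Int) (char_index : Int) : Int × Bool :=
  pvLoopA token_start_index_list token_end_index_list char_index 0 (token_start_index_list.length : Int)

-- ===== PORT B =====
-- go base seg: divide-and-conquer on the zipped segment; seg[m] is in range whenever
-- seg is nonempty (m = len/2 < len), so pyGetD's default is never consulted.
def pvGoB (ci : Int) (base : Int) (seg : List (Int × Int)) : Int × Bool :=
  if seg.isEmpty then (base, false)
  else
    let m : Nat := seg.length / 2
    let p : Int × Int := PySem.List.pyGetD seg (m : Int) (0, 0)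
    if ci < p.1 then pvGoB ci base (PySem.List.slice seg none (some (m : Int)))
    else if ci < p.2 then ((base + (m : Int)), true)
    else pvGoB ci (base + (m : Int) + 1) (PySem.List.slice seg (some ((m : Int) + 1)) none)
termination_by seg.length
decreasing_by
  · rename_i hne _
    rw [PySem.List.slice_to_natCast]
    have : seg.length ≠ 0 := by simpa [List.isEmpty_iff_length_eq_zero] using hne
    simp [List.length_take]; omega
  · rename_i hne _ _
    have h1 : ((m : Int) + 1) = ((m + 1 : Nat) : Int) := by push_cast; ring
    rw [h1, PySem.List.slice_from_natCast]
    have : seg.length ≠ 0 := by simpa [List.isEmpty_iff_length_eq_zero] using hne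
    simp [List.length_drop]; omega

def get_token_index_alt (token_start_index_list : List Int) (token_end_index_list : List Int) (char_index : Int) : Int × Bool :=
  pvGoB char_index 0 (token_start_index_list.zip token_end_index_list)

-- ===== PRECONDITION & SPEC =====
-- Pre_ excludes inputs whose end list is shorter than the start list: outside the
-- natural domain of parallel token lists, A raises IndexError on any probed index
-- ≥ len(end_list) and, when its probes happen to avoid those indices, the value it
-- returns depends on out-of-range accesses B's truncating zip never performs.
def Pre_get_token_index (token_start_index_list : List Int) (token_end_index_list : List Int) (char_index : Int) : Prop :=
  token_start_index_list.length ≤ token_end_index_list.length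
instance (token_start_index_list : List Int) (token_end_index_list : List Int) (char_index : Int) : Decidable (Pre_get_token_index token_start_index_list token_end_index_list char_index) := by unfold Pre_get_token_index; infer_instance

def pvWitness_get_token_index : List Int × List Int × Int := ([0, 5], [5, 9], 6)

def Spec_get_token_index (token_start_index_list : List Int) (token_end_index_list : List Int) (char_index : Int) (out : Int × Bool) : Prop := out = get_token_index_alt token_start_index_list token_end_index_list char_index
instance (token_start_index_list : List Int) (token_end_index_list : List Int) (char_index : Int) (out : Int × Bool) : Decidable (Spec_get_token_index token_start_index_list token_end_index_list char_index out) := by unfold Spec_get_token_index; infer_instance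

-- ===== CLAIM =====
def Claim_equal_get_token_index : Prop := ∀ (token_start_index_list : List Int) (token_end_index_list : List Int) (char_index : Int), Dom_get_token_index token_start_index_list token_end_index_list char_index → Pre_get_token_index token_start_index_list token_end_index_list char_index → Spec_get_token_index token_start_index_list token_end_index_list char_index (get_token_index token_start_index_list token_end_index_list char_index)

-- ===== LEMMAS AND PROOFS =====
theorem pvLoop_eq_go (starts ends : List Int) (ci : Int)
    (hle : starts.length ≤ ends.length) :
    ∀ (n : Nat) (l r : Int), 0 ≤ l → l ≤ r → r ≤ (starts.length : Int) →
      (r - l).toNat = n →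
      pvLoopA starts ends ci l r =
        pvGoB ci l (((starts.zip ends).drop l.toNat).take n) := by
  intro n
  induction n using Nat.strong_induction_on with
  | _ n ih =>
    intro l r hl0 hlr hrlen hn
    have hzlen : (starts.zip ends).length = starts.length := by
      simp [List.length_zip]; omega
    rw [pvLoopA, pvGoB]
    by_cases hlt : l < r
    · have hr : r = l + (n : Int) := by omega
      have hseglen : (((starts.zip ends).drop l.toNat).take n).length = n := by
        simp [List.length_take, List.length_drop, hzlen]; omega
      have hne : (((starts.zip ends).drop l.toNat).take n).isEmpty = false := by
        rw [List.isEmpty_eq_false_iff]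
        exact List.ne_nil_of_length_pos (by omega)
      have hmid : PySem.Int.floordiv (l + r) 2 = l + ((n / 2 : Nat) : Int) := by
        rw [PySem.Int.floordiv_eq_iff_of_pos (by omega)]; omega
      set m : Nat := n / 2 with hm
      have hmn : m < n := by omega
      have hidx : l.toNat + m < starts.length := by omega
      have hsegget : PySem.List.pyGetD (((starts.zip ends).drop l.toNat).take n) (m : Int) ((0:Int),(0:Int))
          = (starts[l.toNat + m]'hidx, ends[l.toNat + m]'(by omega)) := by
        rw [PySem.List.pyGetD_natCast]
        rw [List.getD_eq_getElem _ _ (by omega)]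
        simp [List.getElem_take, List.getElem_drop, List.getElem_zip]
      have hgs : PySem.List.pyGetD starts (l + (m : Int)) 0 = starts[l.toNat + m]'hidx := by
        have : l + (m : Int) = ((l.toNat + m : Nat) : Int) := by omega
        rw [this, PySem.List.pyGetD_natCast, List.getD_eq_getElem _ _ hidx]
      have hge : PySem.List.pyGetD ends (l + (m : Int)) 0 = ends[l.toNat + m]'(by omega) := by
        have : l + (m : Int) = ((l.toNat + m : Nat) : Int) := by omega
        rw [this, PySem.List.pyGetD_natCast, List.getD_eq_getElem _ _ (by omega)]
      have hsegm : (((starts.zip ends).drop l.toNat).take n).length / 2 = m := by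
        rw [hseglen]
      simp only [hlt, dif_pos, hne, Bool.false_eq_true, if_neg, not_false_iff, hmid, hsegm,
        hsegget, hgs, hge]
      by_cases hA : ci < starts[l.toNat + m]'hidx
      · -- both recurse into the left half
        rw [if_neg (by omega), if_pos (by omega), if_pos hA]
        rw [PySem.List.slice_to_natCast, List.take_take]
        have hminm : min m n = m := by omega
        rw [hminm]
        exact ih m (by omega) l (l + (m:Int)) hl0 (by omega) (by omega) (by omega)
      · by_cases hB : ci < ends[l.toNat + m]'(by omega)
        · -- hit on both sides
          rw [if_pos (by constructor <;> omega), if_neg hA, if_pos hB]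
        · -- both recurse into the right half
          rw [if_neg (by omega), if_neg (by omega), if_neg hA, if_neg hB]
          have hc : ((m : Int) + 1) = ((m + 1 : Nat) : Int) := by push_cast; ring
          rw [hc, PySem.List.slice_from_natCast, List.drop_take]
          have hd : ((starts.zip ends).drop l.toNat).drop (m + 1)
              = (starts.zip ends).drop ((l + (m:Int) + 1).toNat) := by
            rw [List.drop_drop]
            congr 1; omega
          rw [hd]
          have hrec := ih (n - (m + 1)) (by omega) (l + (m:Int) + 1) r (by omega) (by omega)
            (by omega) (by omega)
          rw [hrec]
    · have hn0 : n = 0 := by omega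
      subst hn0
      simp [hlt]

-- ===== VERDICT =====
theorem get_token_index_spec : Claim_equal_get_token_index := by
  intro s e ci _ hpre
  unfold Spec_get_token_index get_token_index get_token_index_alt
  have h := pvLoop_eq_go s e ci hpre ((s.length : Int) - 0).toNat 0 (s.length : Int)
    (by omega) (by omega) (by omega) rfl
  have hz : (s.zip e).length ≤ ((s.length : Int) - 0).toNat := by
    simp [List.length_zip]
  rw [h, Int.toNat_zero, List.drop_zero, List.take_of_length_le hz]
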